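-- pv_equiv track=rewrite | github.com/javier/questdb_dataset_utils | sparse_cross_join.py | generate_vehicle_ids
-- ===== SOURCE A (Python) =====
-- def generate_vehicle_ids(num_vehicles):
--     vehicle_ids = []
--     prefix_chars = [chr(i) for i in range(65, 91)]  # A-Z
--     for i in range(num_vehicles):
--         prefix_num = i // (16 ** 4)
--         hex_num = i % (16 ** 4)
--         prefix = ''.join(prefix_chars[(prefix_num // (26 ** j)) % 26] for j in reversed(range(3)))
--         vehicle_id = f"{prefix}{hex_num:04X}"
--         vehicle_ids.append(vehicle_id)
--     return vehicle_ids
-- ===== SOURCE B (Python) =====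
-- def generate_vehicle_ids(num_vehicles):
--     # Odometer: carry running prefix indices and hex counter instead of
--     # recomputing div/mod per index.
--     ids = []
--     p0 = p1 = p2 = h = 0
--     for _ in range(num_vehicles):
--         ids.append(f"{chr(65 + p0)}{chr(65 + p1)}{chr(65 + p2)}{h:04X}")
--         h += 1
--         if h == 16 ** 4:
--             h = 0
--             p2 += 1
--             if p2 == 26:
--                 p2 = 0
--                 p1 += 1
--                 if p1 == 26:
--                     p1 = 0
--                     p0 = (p0 + 1) % 26
--     return ids
-- ===== Notes on version B (the rewrite author's own statement) =====
-- stated objective: faster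
-- what changed: Replaces A's per-index integer division/modulo and per-item string join over a generator with a ripple-carry odometer (three letter indices and a hex counter carried across iterations).
import Mathlib
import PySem

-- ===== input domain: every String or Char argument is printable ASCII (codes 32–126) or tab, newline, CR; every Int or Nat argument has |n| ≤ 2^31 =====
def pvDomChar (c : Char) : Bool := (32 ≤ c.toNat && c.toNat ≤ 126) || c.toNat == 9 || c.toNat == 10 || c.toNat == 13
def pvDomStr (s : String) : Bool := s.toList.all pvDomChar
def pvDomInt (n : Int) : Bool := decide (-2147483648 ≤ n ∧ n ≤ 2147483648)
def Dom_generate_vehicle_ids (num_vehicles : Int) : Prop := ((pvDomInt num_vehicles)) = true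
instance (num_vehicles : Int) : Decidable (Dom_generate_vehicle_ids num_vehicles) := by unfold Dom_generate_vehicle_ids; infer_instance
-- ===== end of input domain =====

-- B replaces A's per-index division/modulo arithmetic with a ripple-carry odometer state
-- (three letter indices and a hex counter); measured constant-factor speedup in Python.


-- shared helper: one hex digit of f-string 'X' formatting
def pvHexDigit (d : Nat) : Char := if d < 10 then Char.ofNat (48 + d) else Char.ofNat (55 + d)
-- shared helper: f"{h:04X}" — exact for 0 ≤ h < 16^4, the only values both programs format
def pvHex4 (h : Nat) : String :=
  String.ofList [pvHexDigit (h / 4096 % 16), pvHexDigit (h / 256 % 16), pvHexDigit (h / 16 % 16), pvHexDigit (h % 16)]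

-- ===== PORT A =====
-- prefix_chars = [chr(i) for i in range(65, 91)]
def pvPrefixChars : List String :=
  (PySem.List.pyRange 65 91 1).map (fun i => String.ofList [Char.ofNat i.toNat])

def generate_vehicle_ids (num_vehicles : Int) : List String :=
  (PySem.List.pyRange 0 num_vehicles 1).foldl
    (fun vehicle_ids i =>
      let prefix_num := PySem.Int.floordiv i (16 ^ 4)
      let hex_num := PySem.Int.mod i (16 ^ 4)
      -- ''.join(prefix_chars[(prefix_num // (26 ** j)) % 26] for j in reversed(range(3)));
      -- the index is always in [0, 26) so the list indexing never raises (.getD "" is unreachable);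
      -- j ∈ {0,1,2} so 26 ** j is 26 ^ j.toNat
      let pref := PySem.Str.join ""
        ((PySem.List.pyRange 0 3 1).reverse.map (fun j =>
          (PySem.List.pyGet? pvPrefixChars
            (PySem.Int.mod (PySem.Int.floordiv prefix_num (26 ^ j.toNat)) 26)).getD ""))
      -- hex_num = i % 16^4 ≥ 0, so .toNat is exact
      vehicle_ids ++ [pref ++ pvHex4 hex_num.toNat])
    []

-- ===== PORT B =====
-- chr(65 + p)
def pvLetter (p : Nat) : String := String.ofList [Char.ofNat (65 + p)]

-- the loop of Source B: fuel = remaining iterations, state (h, p0, p1, p2)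
def pvGenLoop : Nat → Nat → Nat → Nat → Nat → List String
  | 0, _, _, _, _ => []
  | n + 1, h, p0, p1, p2 =>
    (pvLetter p0 ++ pvLetter p1 ++ pvLetter p2 ++ pvHex4 h) ::
    (if h + 1 = 16 ^ 4 then
       if p2 + 1 = 26 then
         if p1 + 1 = 26 then pvGenLoop n 0 ((p0 + 1) % 26) 0 0
         else pvGenLoop n 0 p0 (p1 + 1) 0
       else pvGenLoop n 0 p0 p1 (p2 + 1)
     else pvGenLoop n (h + 1) p0 p1 p2)

def generate_vehicle_ids_alt (num_vehicles : Int) : List String :=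
  pvGenLoop num_vehicles.toNat 0 0 0 0

-- ===== PRECONDITION & SPEC =====
def Spec_generate_vehicle_ids (num_vehicles : Int) (out : List String) : Prop := out = generate_vehicle_ids_alt num_vehicles
instance (num_vehicles : Int) (out : List String) : Decidable (Spec_generate_vehicle_ids num_vehicles out) := by unfold Spec_generate_vehicle_ids; infer_instance

-- ===== CLAIM (what is proved, stated in full; the proofs are below) =====
def Claim_equal_generate_vehicle_ids : Prop := ∀ (num_vehicles : Int), Dom_generate_vehicle_ids num_vehicles → Spec_generate_vehicle_ids num_vehicles (generate_vehicle_ids num_vehicles)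

-- ===== LEMMAS AND PROOFS =====

-- closed form of the i-th vehicle id (i : Nat)
def pvId (i : Nat) : String :=
  pvLetter (i / 16 ^ 4 / 26 / 26 % 26) ++ pvLetter (i / 16 ^ 4 / 26 % 26) ++
    pvLetter (i / 16 ^ 4 % 26) ++ pvHex4 (i % 16 ^ 4)

theorem pvJoin3 (a b c : String) : PySem.Str.join "" [a, b, c] = a ++ b ++ c := by
  simp [PySem.Str.join, PySem.Chars.join, List.intercalate, String.ofList_toList,
    String.append_assoc]

theorem pvGetLetter (d : Nat) (hd : d < 26) :
    (PySem.List.pyGet? pvPrefixChars ((d : Nat) : Int)).getD "" = pvLetter d := by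
  unfold pvPrefixChars pvLetter
  rw [PySem.List.pyRange_one]
  norm_num
  simp [hd]
  rw [show ((65 : Int) + d).toNat = 65 + d from by omega]

theorem pvA_eq_map (n : Int) :
    generate_vehicle_ids n = (List.range n.toNat).map (fun i => pvId i) := by
  unfold generate_vehicle_ids
  have hrev : (PySem.List.pyRange 0 3 1).reverse = [2, 1, 0] := by decide
  simp only [hrev]
  rw [PySem.List.pyRange_one, List.foldl_map, PySem.List.foldl_append_singleton_eq_map]
  simp only [sub_zero]
  refine List.map_congr_left (fun k _ => ?_)
  simp only [zero_add]
  have h16 : ((16 : Int) ^ 4) = ((65536 : Nat) : Int) := by decide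
  have h2 : ((26 : Int) ^ Int.toNat 2) = ((676 : Nat) : Int) := by decide
  have h1 : ((26 : Int) ^ Int.toNat 1) = ((26 : Nat) : Int) := by decide
  have h0 : ((26 : Int) ^ Int.toNat 0) = ((1 : Nat) : Int) := by decide
  have hmod : ∀ m : Nat, PySem.Int.mod ((m : Nat) : Int) 26 = ((m % 26 : Nat) : Int) := by
    intro m
    rw [show (26 : Int) = ((26 : Nat) : Int) from rfl, PySem.Int.mod_natCast]
  simp only [h16, h2, h1, h0, PySem.Int.floordiv_natCast, hmod, List.map_cons,
    List.map_nil]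
  rw [pvGetLetter _ (Nat.mod_lt _ (by norm_num)), pvGetLetter _ (Nat.mod_lt _ (by norm_num)),
    pvGetLetter _ (Nat.mod_lt _ (by norm_num)), pvJoin3]
  have hk : (((k : Int)) % 65536).toNat = k % 65536 := by omega
  simp [pvId, Nat.div_div_eq_div_mul, hk]

theorem pvGenLoop_eq (n : Nat) : ∀ (i : Nat),
    pvGenLoop n (i % 65536) (i / 65536 / 26 / 26 % 26) (i / 65536 / 26 % 26) (i / 65536 % 26)
      = (List.range n).map (fun j => pvId (i + j)) := by
  induction n with
  | zero => intro i; simp [pvGenLoop]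
  | succ n ih =>
    intro i
    have hr : (List.range (n + 1)).map (fun j => pvId (i + j))
        = pvId i :: (List.range n).map (fun j => pvId (i + 1 + j)) := by
      rw [List.range_succ_eq_map, List.map_cons, List.map_map]
      rw [List.cons_eq_cons]
      refine ⟨by rw [Nat.add_zero], List.map_congr_left (fun j _ => ?_)⟩
      simp only [Function.comp, Nat.succ_eq_add_one]
      rw [show i + (j + 1) = i + 1 + j from by omega]
    rw [hr, pvGenLoop, List.cons_eq_cons]
    refine ⟨by simp [pvId], ?_⟩
    rw [show (16 : Nat) ^ 4 = 65536 from by norm_num]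
    by_cases hh : i % 65536 + 1 = 65536
    · by_cases hp2 : i / 65536 % 26 + 1 = 26
      · by_cases hp1 : i / 65536 / 26 % 26 + 1 = 26
        · rw [if_pos hh, if_pos hp2, if_pos hp1]
          have := ih (i + 1)
          rw [show (i + 1) % 65536 = 0 from by omega,
            show (i + 1) / 65536 / 26 / 26 % 26 = (i / 65536 / 26 / 26 % 26 + 1) % 26 from by omega,
            show (i + 1) / 65536 / 26 % 26 = 0 from by omega,
            show (i + 1) / 65536 % 26 = 0 from by omega] at this
          exact this
        · rw [if_pos hh, if_pos hp2, if_neg hp1]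
          have := ih (i + 1)
          rw [show (i + 1) % 65536 = 0 from by omega,
            show (i + 1) / 65536 / 26 / 26 % 26 = i / 65536 / 26 / 26 % 26 from by omega,
            show (i + 1) / 65536 / 26 % 26 = i / 65536 / 26 % 26 + 1 from by omega,
            show (i + 1) / 65536 % 26 = 0 from by omega] at this
          exact this
      · rw [if_pos hh, if_neg hp2]
        have := ih (i + 1)
        rw [show (i + 1) % 65536 = 0 from by omega,
          show (i + 1) / 65536 / 26 / 26 % 26 = i / 65536 / 26 / 26 % 26 from by omega,
          show (i + 1) / 65536 / 26 % 26 = i / 65536 / 26 % 26 from by omega,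
          show (i + 1) / 65536 % 26 = i / 65536 % 26 + 1 from by omega] at this
        exact this
    · rw [if_neg hh]
      have := ih (i + 1)
      rw [show (i + 1) % 65536 = i % 65536 + 1 from by omega,
        show (i + 1) / 65536 / 26 / 26 % 26 = i / 65536 / 26 / 26 % 26 from by omega,
        show (i + 1) / 65536 / 26 % 26 = i / 65536 / 26 % 26 from by omega,
        show (i + 1) / 65536 % 26 = i / 65536 % 26 from by omega] at this
      exact this

-- ===== VERDICT (by name: the statement is the Claim_ definition above) =====
theorem generate_vehicle_ids_spec : Claim_equal_generate_vehicle_ids := by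
  intro n _
  unfold Spec_generate_vehicle_ids generate_vehicle_ids_alt
  rw [pvA_eq_map]
  have h := pvGenLoop_eq n.toNat 0
  simpa using h.symm
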